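-- pv_equiv track=rewrite | github.com/ethereum/research | rsa_moduli/random_numbers_with_multiplicative_group.py | check_multiplicative_group
-- ===== SOURCE A (Python) =====
-- from collections import defaultdict
--
-- def prod(l):
--     r = 1
--     for x in l:
--         r *= x
--     return r
--
-- def check_multiplicative_group(x, xf, xphi):
--     xfdict = defaultdict(int)
--     for p in xf:
--         xfdict[p] += 1
--
--     group_order = 1
--     for p, alpha in xfdict.items():
--         group_order *= (p - 1) * p ** (alpha - 1)
--
--     return group_order == prod(xphi)
-- ===== SOURCE B (Python) =====
-- def check_multiplicative_group(x, xf, xphi):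
--     group_order = 1
--     seen = set()
--     for p in xf:
--         if p in seen:
--             group_order *= p
--         else:
--             group_order *= p - 1
--             seen.add(p)
--     phi_prod = 1
--     for v in xphi:
--         phi_prod *= v
--     return group_order == phi_prod
-- ===== Notes on version B (the rewrite author's own statement) =====
-- stated objective: simpler
-- what changed: Replaces the two-phase algorithm (build a defaultdict of prime multiplicities, then a second loop multiplying (p-1)*p**(alpha-1) per distinct prime) by a single pass over xf with a seen-set: the first occurrence of p contributes p-1 and each repeat contributes p, eliminating the dict, the second loop and the exponentiation.
import Mathlib
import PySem

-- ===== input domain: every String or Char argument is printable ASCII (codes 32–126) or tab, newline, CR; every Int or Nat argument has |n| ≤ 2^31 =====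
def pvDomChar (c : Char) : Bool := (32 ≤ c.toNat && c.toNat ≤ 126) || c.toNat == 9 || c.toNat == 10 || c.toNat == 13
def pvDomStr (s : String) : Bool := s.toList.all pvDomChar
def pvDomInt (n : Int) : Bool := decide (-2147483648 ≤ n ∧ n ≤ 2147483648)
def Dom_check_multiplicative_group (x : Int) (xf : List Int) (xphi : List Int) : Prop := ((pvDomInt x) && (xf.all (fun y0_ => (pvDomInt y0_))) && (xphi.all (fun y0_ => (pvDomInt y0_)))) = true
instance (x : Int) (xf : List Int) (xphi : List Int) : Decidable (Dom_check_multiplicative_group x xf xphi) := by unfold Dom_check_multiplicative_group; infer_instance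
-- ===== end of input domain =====

-- B replaces A's two-phase count-then-exponentiate algorithm by one pass over xf with a
-- seen-set (first occurrence of p contributes p-1, repeats contribute p): simpler, same cost.

-- ===== PORT A =====
-- helper 'prod' of the Python module
def pyProd (l : List Int) : Int := l.foldl (fun r x => r * x) 1

def check_multiplicative_group (x : Int) (xf : List Int) (xphi : List Int) : Bool :=
  let xfdict : PySem.Dict Int Int := xf.foldl (fun d p => d.modify p 0 (· + 1)) PySem.Dict.empty
  let group_order : Int := xfdict.items.foldl (fun g pa => g * ((pa.1 - 1) * pa.1 ^ (pa.2 - 1).toNat)) 1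
  group_order == pyProd xphi

-- ===== PORT B =====
def check_multiplicative_group_alt (x : Int) (xf : List Int) (xphi : List Int) : Bool :=
  let gs := xf.foldl (fun (gs : Int × PySem.Set Int) p =>
    if PySem.Set.contains gs.2 p then (gs.1 * p, gs.2)
    else (gs.1 * (p - 1), PySem.Set.add gs.2 p)) (1, PySem.Set.empty)
  let phi_prod : Int := xphi.foldl (fun r v => r * v) 1
  gs.1 == phi_prod

-- ===== PRECONDITION & SPEC =====
def Spec_check_multiplicative_group (x : Int) (xf : List Int) (xphi : List Int) (out : Bool) : Prop := out = check_multiplicative_group_alt x xf xphi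
instance (x : Int) (xf : List Int) (xphi : List Int) (out : Bool) : Decidable (Spec_check_multiplicative_group x xf xphi out) := by unfold Spec_check_multiplicative_group; infer_instance

-- ===== CLAIM (what is proved, stated in full; the proofs are below) =====
def Claim_equal_check_multiplicative_group : Prop := ∀ (x : Int) (xf : List Int) (xphi : List Int), Dom_check_multiplicative_group x xf xphi → Spec_check_multiplicative_group x xf xphi (check_multiplicative_group x xf xphi)

-- ===== LEMMAS AND PROOFS =====

-- a product-accumulating foldl is the product of the mapped list
theorem pv_foldl_mul {α : Type} (f : α → Int) : ∀ (l : List α) (g : Int),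
    l.foldl (fun a x => a * f x) g = g * (l.map f).prod := by
  intro l
  induction l with
  | nil => intro g; simp
  | cons a t ih => intro g; simp [List.foldl_cons, ih, mul_assoc]

-- the distinct-prime term of A: (k-1) * k^(count k in xf - 1)
def pvTerm (xf : List Int) (k : Int) : Int := (k - 1) * k ^ (((xf.count k : Int)) - 1).toNat

-- A's group order as a closed product over the distinct elements of xf
def pvG (xf : List Int) : Int := ((PySem.Set.ofList xf).map (pvTerm xf)).prod

-- multiplying one occurrence's term by p multiplies the whole product by p
theorem pv_prod_update (p : Int) (f f' : Int → Int) :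
    ∀ (S : List Int), S.Nodup → p ∈ S → (∀ k ∈ S, k ≠ p → f' k = f k) → f' p = p * f p →
      (S.map f').prod = p * (S.map f).prod := by
  intro S
  induction S with
  | nil => intro _ h; simp at h
  | cons a t ih =>
    intro hnd hp hagree hfp
    rcases List.mem_cons.mp hp with heq | hmem
    · subst heq
      have hnp : p ∉ t := (List.nodup_cons.mp hnd).1
      have : t.map f' = t.map f := by
        apply List.map_congr_left
        intro k hk
        exact hagree k (List.mem_cons_of_mem _ hk) (fun h => hnp (h ▸ hk))
      simp [this, hfp, mul_assoc]
    · have ha : f' a = f a := by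
        rcases eq_or_ne a p with h | h
        · exact absurd (h ▸ hmem) (List.nodup_cons.mp hnd).1
        · exact hagree a List.mem_cons_self h
      have := ih (List.nodup_cons.mp hnd).2 hmem
        (fun k hk => hagree k (List.mem_cons_of_mem _ hk)) hfp
      simp [ha, this, mul_left_comm]

-- appending p to xf multiplies pvG by p (seen before) or p-1 (new)
theorem pvG_append (xf : List Int) (p : Int) :
    pvG (xf ++ [p]) = pvG xf * (if p ∈ xf then p else p - 1) := by
  by_cases hp : p ∈ xf
  · simp only [hp, if_pos]
    unfold pvG
    rw [PySem.Set.ofList_append_singleton, PySem.Set.add_of_mem ((PySem.Set.mem_ofList _ _).mpr hp)]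
    rw [pv_prod_update p (pvTerm xf) (pvTerm (xf ++ [p])) (PySem.Set.ofList xf)
        (PySem.Set.nodup_ofList _) ((PySem.Set.mem_ofList _ _).mpr hp)]
    · ring
    · intro k _ hk
      unfold pvTerm
      have hcc : (xf ++ [p]).count k = xf.count k := by
        rw [List.count_append]
        simp [List.count_singleton, hk, Ne.symm hk]
      rw [hcc]
    · unfold pvTerm
      have hc : 1 ≤ xf.count p := List.one_le_count_iff.mpr hp
      have hcc : (xf ++ [p]).count p = xf.count p + 1 := by
        rw [List.count_append]
        simp [List.count_singleton]
      rw [hcc]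
      have h1 : (((xf.count p + 1 : Nat) : Int) - 1).toNat = xf.count p := by omega
      have h2 : (((xf.count p : Int)) - 1).toNat = xf.count p - 1 := by omega
      rw [h1, h2]
      conv_lhs => rw [show xf.count p = (xf.count p - 1) + 1 from by omega]
      rw [pow_succ]
      ring
  · simp only [hp, if_neg, not_false_iff]
    unfold pvG
    rw [PySem.Set.ofList_append_singleton, PySem.Set.add_of_not_mem (fun h => hp ((PySem.Set.mem_ofList _ _).mp h))]
    rw [List.map_append, List.prod_append]
    have hmap : (PySem.Set.ofList xf).map (pvTerm (xf ++ [p])) = (PySem.Set.ofList xf).map (pvTerm xf) := by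
      apply List.map_congr_left
      intro k hk
      have hk' : k ∈ xf := (PySem.Set.mem_ofList _ _).mp hk
      have hkp : k ≠ p := fun h => hp (h ▸ hk')
      unfold pvTerm
      have hcc : (xf ++ [p]).count k = xf.count k := by
        rw [List.count_append]
        simp [List.count_singleton, hkp, Ne.symm hkp]
      rw [hcc]
    rw [hmap]
    have : pvTerm (xf ++ [p]) p = p - 1 := by
      unfold pvTerm
      rw [List.count_append]
      have : xf.count p = 0 := List.count_eq_zero.mpr hp
      simp [this]
    simp [this, pvG]

-- B's single fold computes (pvG xf, set of elements of xf)
theorem pvB_fold (xf : List Int) :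
    xf.foldl (fun (gs : Int × PySem.Set Int) p =>
      if PySem.Set.contains gs.2 p then (gs.1 * p, gs.2)
      else (gs.1 * (p - 1), PySem.Set.add gs.2 p)) (1, PySem.Set.empty)
    = (pvG xf, PySem.Set.ofList xf) := by
  induction xf using List.reverseRecOn with
  | nil => simp [pvG, PySem.Set.ofList, PySem.Set.empty]
  | append_singleton t p ih =>
    rw [List.foldl_append, ih, List.foldl_cons, List.foldl_nil,
        pvG_append, PySem.Set.ofList_append_singleton]
    by_cases hp : p ∈ t
    · have : PySem.Set.contains (PySem.Set.ofList t) p = true :=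
        (PySem.Set.contains_iff _ _).mpr ((PySem.Set.mem_ofList _ _).mpr hp)
      simp [this, hp, PySem.Set.add_of_mem hp]
    · have : PySem.Set.contains (PySem.Set.ofList t) p = false := by
        by_contra h
        exact hp ((PySem.Set.mem_ofList _ _).mp ((PySem.Set.contains_iff _ _).mp (by simpa using h)))
      simp [this, hp]

-- A's two-phase computation also yields pvG xf
theorem pvA_order (xf : List Int) :
    ((xf.foldl (fun d p => d.modify p 0 (· + 1)) PySem.Dict.empty : PySem.Dict Int Int)).items.foldl
      (fun g pa => g * ((pa.1 - 1) * pa.1 ^ (pa.2 - 1).toNat)) 1 = pvG xf := by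
  rw [← PySem.Dict.counter_eq_foldl, PySem.Dict.items_counter]
  rw [pv_foldl_mul (fun pa : Int × Int => (pa.1 - 1) * pa.1 ^ (pa.2 - 1).toNat)]
  rw [List.map_map]
  simp only [one_mul]
  rfl

-- ===== VERDICT (by name: the statement is the Claim_ definition above) =====
theorem check_multiplicative_group_spec : Claim_equal_check_multiplicative_group := by
  intro x xf xphi _
  show check_multiplicative_group x xf xphi = check_multiplicative_group_alt x xf xphi
  simp only [check_multiplicative_group, check_multiplicative_group_alt, pyProd, pvA_order, pvB_fold]
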